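-- pv_equiv track=rewrite | github.com/gematik/structure-comparer | service/src/structure_comparer/child_action_propagation.py | _build_field_hierarchy
-- ===== SOURCE A (Python) =====
-- from typing import Dict, List
--
-- def _build_field_hierarchy(mapping_fields: Dict) -> Dict[str, List[str]]:
--     """
--     Build a hierarchy map of parent -> children relationships from mapping fields.
--
--     Args:
--         mapping_fields: Dictionary of field name -> field object
--
--     Returns:
--         Dictionary mapping parent field names to lists of child field names
--     """
--     hierarchy = {}
--     field_names = sorted(mapping_fields.keys())
--
--     for field_name in field_names:
--         hierarchy[field_name] = []
--
--         # Find all fields that are children of this field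
--         for other_field_name in field_names:
--             if other_field_name != field_name and _is_child_field(field_name, other_field_name):
--                 hierarchy[field_name].append(other_field_name)
--     return hierarchy
--
-- def _is_child_field(parent_name: str, child_name: str) -> bool:
--     """
--     Check if child_name is a child of parent_name in the field hierarchy.
--     This includes both direct and nested children.
--
--     Args:
--         parent_name: Name of the potential parent field
--         child_name: Name of the potential child field
--
--     Returns:
--         True if child_name is a child of parent_name
--     """
--     # Check for both ":" and "." as separators for FHIR field hierarchy
--     if not (child_name.startswith(parent_name + ":") or child_name.startswith(parent_name + ".")):
--         return False
--
--     # Any field that starts with parent_name + separator is considered a child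
--     # This allows for nested inheritance (e.g., parent affects grandchildren too)
--     return True
-- ===== SOURCE B (Python) =====
-- def _build_field_hierarchy(mapping_fields):
--     """Single pass: for each field, walk its characters and register it with every
--     ancestor prefix that ends just before a separator, via one dict lookup (O(n*L)
--     hash lookups instead of A's O(n^2) pairwise prefix tests)."""
--     names = sorted(mapping_fields)
--     hierarchy = {name: [] for name in names}
--     for child in names:
--         acc = ""
--         for ch in child:
--             if ch == "." or ch == ":":
--                 lst = hierarchy.get(acc)
--                 if lst is not None:
--                     lst.append(child)
--             acc += ch
--     return hierarchy
-- ===== Notes on version B (the rewrite author's own statement) =====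
-- stated objective: faster
-- what changed: Instead of testing every (parent, child) key pair with two startswith calls (O(n^2) pairwise scans), B scans each key once and registers it with every ancestor prefix ending before a '.' or ':' via a single dict lookup per separator.
import Mathlib
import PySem

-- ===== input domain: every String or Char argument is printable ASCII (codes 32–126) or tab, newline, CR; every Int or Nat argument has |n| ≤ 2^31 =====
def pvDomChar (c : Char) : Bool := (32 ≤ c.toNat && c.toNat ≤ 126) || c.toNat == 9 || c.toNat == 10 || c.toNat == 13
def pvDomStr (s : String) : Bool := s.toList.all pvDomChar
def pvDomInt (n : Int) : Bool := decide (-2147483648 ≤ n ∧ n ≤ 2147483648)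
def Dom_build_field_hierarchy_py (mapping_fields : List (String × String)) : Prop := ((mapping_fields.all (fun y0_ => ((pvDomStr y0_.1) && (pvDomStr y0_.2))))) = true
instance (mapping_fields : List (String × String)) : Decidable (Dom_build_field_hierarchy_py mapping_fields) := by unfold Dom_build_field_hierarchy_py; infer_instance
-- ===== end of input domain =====

-- B replaces A's O(n^2) pairwise prefix tests by one scan of each field name that
-- registers it with every ancestor prefix through a dict lookup (alternative algorithm, measured faster).

-- ===== PORT A =====
def is_child_py (parent_name child_name : String) : Bool :=
  if !(PySem.Str.startswith child_name (parent_name ++ ":") ||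
       PySem.Str.startswith child_name (parent_name ++ ".")) then false
  else true

def build_field_hierarchy_py (mapping_fields : List (String × String)) : List (String × List String) :=
  let field_names := PySem.List.sorted (PySem.Dict.ofList mapping_fields).keys (fun x => x)
  let hierarchy := field_names.foldl (fun (h : PySem.Dict String (List String)) field_name =>
      let h := h.insert field_name ([] : List String)
      field_names.foldl (fun h other =>
        if (other != field_name) && is_child_py field_name other
        then h.modify field_name [] (fun l => l ++ [other]) else h) h)
    PySem.Dict.empty
  hierarchy.items

-- ===== PORT B =====
-- per-character step of Source B's inner loop: st = (hierarchy, acc)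
def bStep (child : String) (st : PySem.Dict String (List String) × String) (ch : Char) :
    PySem.Dict String (List String) × String :=
  let d := st.1
  let acc := st.2
  let d := if ch = '.' ∨ ch = ':' then
             -- 'lst = hierarchy.get(acc); if lst is not None: lst.append(child)' (in-place)
             (if d.contains acc then d.modify acc [] (fun l => l ++ [child]) else d)
           else d
  (d, acc.push ch)

def build_field_hierarchy_py_alt (mapping_fields : List (String × String)) : List (String × List String) :=
  let names := PySem.List.sorted (PySem.Dict.ofList mapping_fields).keys (fun x => x)
  let hierarchy := names.foldl (fun (d : PySem.Dict String (List String)) n => d.insert n ([] : List String)) PySem.Dict.empty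
  let hierarchy := names.foldl (fun d child => (child.toList.foldl (bStep child) (d, "")).1) hierarchy
  hierarchy.items

-- ===== PRECONDITION & SPEC =====
def Spec_build_field_hierarchy_py (mapping_fields : List (String × String)) (out : List (String × List String)) : Prop := out = build_field_hierarchy_py_alt mapping_fields
instance (mapping_fields : List (String × String)) (out : List (String × List String)) : Decidable (Spec_build_field_hierarchy_py mapping_fields out) := by unfold Spec_build_field_hierarchy_py; infer_instance

-- ===== CLAIM (what is proved, stated in full; the proofs are below) =====
def Claim_equal_build_field_hierarchy_py : Prop := ∀ (mapping_fields : List (String × String)), Dom_build_field_hierarchy_py mapping_fields → Spec_build_field_hierarchy_py mapping_fields (build_field_hierarchy_py mapping_fields)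

-- ===== LEMMAS AND PROOFS =====

-- Bool recursion mirroring Source B's inner scan: does some split rest = u ++ sep :: v
-- with separator sep and t ++ u = p exist?
def occB (t : List Char) (rest : List Char) (p : List Char) : Bool :=
  match rest with
  | [] => false
  | ch :: rest' => (decide ((ch = '.' ∨ ch = ':') ∧ t = p)) || occB (t ++ [ch]) rest' p

-- A's inner test, as a single Bool
def condA (fn o : String) : Bool := (o != fn) && is_child_py fn o

lemma occB_length {t rest p : List Char} (h : occB t rest p = true) : t.length ≤ p.length := by
  induction rest generalizing t with
  | nil => simp [occB] at h
  | cons ch rest' ih =>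
    simp only [occB, Bool.or_eq_true, decide_eq_true_eq] at h
    rcases h with ⟨_, rfl⟩ | h
    · exact le_refl _
    · have := ih h
      simp at this; omega

lemma occB_iff (rest : List Char) (p : List Char) : ∀ (t : List Char),
    occB t rest p = true ↔ ∃ u sep v, rest = u ++ sep :: v ∧ (sep = '.' ∨ sep = ':') ∧ t ++ u = p := by
  induction rest with
  | nil =>
    intro t
    constructor
    · intro h; simp [occB] at h
    · rintro ⟨u, sep, v, hrest, -⟩
      exact absurd hrest (by simp)
  | cons ch rest' ih =>
    intro t
    constructor
    · intro h
      simp only [occB, Bool.or_eq_true, decide_eq_true_eq] at h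
      rcases h with ⟨hsep, rfl⟩ | h
      · exact ⟨[], ch, rest', by simp, hsep, by simp⟩
      · obtain ⟨u, sep, v, hrest, hsep, hu⟩ := (ih (t ++ [ch])).mp h
        exact ⟨ch :: u, sep, v, by simp [hrest], hsep, by simpa using hu⟩
    · rintro ⟨u, sep, v, hrest, hsep, hu⟩
      simp only [occB, Bool.or_eq_true, decide_eq_true_eq]
      cases u with
      | nil =>
        left; constructor
        · cases hrest; exact hsep
        · simpa using hu
      | cons x u' =>
        right
        obtain ⟨rfl, rfl⟩ : ch = x ∧ rest' = u' ++ sep :: v := by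
          simpa using hrest
        exact (ih (t ++ [ch])).mpr ⟨u', sep, v, rfl, hsep, by simpa using hu⟩

-- the intrinsic child relation both programs compute
def childP (p c : String) : Prop :=
  (p.toList ++ ['.'] <+: c.toList) ∨ (p.toList ++ [':'] <+: c.toList)

lemma occB_nil_iff_childP (p c : String) : occB [] c.toList p.toList = true ↔ childP p c := by
  rw [occB_iff]
  constructor
  · rintro ⟨u, sep, v, hrest, hsep, hu⟩
    simp only [List.nil_append] at hu
    subst hu
    rcases hsep with rfl | rfl
    · exact Or.inl ⟨v, by simp [hrest]⟩
    · exact Or.inr ⟨v, by simp [hrest]⟩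
  · rintro (⟨v, hv⟩ | ⟨v, hv⟩)
    · exact ⟨p.toList, '.', v, by simp [← hv], Or.inl rfl, by simp⟩
    · exact ⟨p.toList, ':', v, by simp [← hv], Or.inr rfl, by simp⟩

lemma decide_prefix_eq (s q : List Char) : decide (q <+: s) = PySem.Chars.startswith s q := by
  cases hb : PySem.Chars.startswith s q
  · have : ¬ q <+: s := fun hh => by rw [(PySem.Chars.startswith_iff s q).mpr hh] at hb; exact Bool.noConfusion hb
    simp [this]
  · simp [(PySem.Chars.startswith_iff s q).mp hb]

lemma is_child_eq (p c : String) :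
    is_child_py p c = (decide ((p.toList ++ [':']) <+: c.toList) || decide ((p.toList ++ ['.']) <+: c.toList)) := by
  unfold is_child_py
  rw [PySem.Str.startswith_eq, PySem.Str.startswith_eq, String.toList_append, String.toList_append]
  have h1 : (":" : String).toList = [':'] := rfl
  have h2 : ("." : String).toList = ['.'] := rfl
  rw [h1, h2, decide_prefix_eq, decide_prefix_eq]
  cases hx : PySem.Chars.startswith c.toList (p.toList ++ [':']) <;>
  cases hy : PySem.Chars.startswith c.toList (p.toList ++ ['.']) <;>
    simp

lemma condA_eq_occB (p c : String) :
    ((c != p) && is_child_py p c) = occB [] c.toList p.toList := by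
  by_cases h : childP p c
  · rw [(occB_nil_iff_childP p c).mpr h]
    have hne : (c != p) = true := by
      refine bne_iff_ne.mpr (fun hcp => ?_)
      subst hcp
      rcases h with ⟨v, hv⟩ | ⟨v, hv⟩ <;> · have := congrArg List.length hv; simp at this
    have hchild : is_child_py p c = true := by
      rw [is_child_eq]
      rcases h with hpre | hpre <;> simp [hpre]
    rw [hne, hchild]; rfl
  · have hoc : occB [] c.toList p.toList = false := by
      cases hb : occB [] c.toList p.toList
      · rfl
      · exact absurd ((occB_nil_iff_childP p c).mp hb) h
    have hchild : is_child_py p c = false := by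
      rw [is_child_eq]
      rcases not_or.mp h with ⟨h1, h2⟩
      simp [h1, h2]
    rw [hoc, hchild, Bool.and_false]

-- ---- B-side dictionary lemmas ----

lemma bInner_keys (child : String) : ∀ (rest : List Char) (st : PySem.Dict String (List String) × String),
    ((rest.foldl (bStep child) st).1).keys = st.1.keys := by
  intro rest
  induction rest with
  | nil => intro st; rfl
  | cons ch rest' ih =>
    intro st
    rw [List.foldl_cons, ih]
    show (bStep child st ch).1.keys = st.1.keys
    unfold bStep
    by_cases hsep : (ch = '.' ∨ ch = ':')
    · by_cases hc : st.1.contains st.2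
      · simp only [hsep, if_true, hc, if_true]
        rw [PySem.Dict.keys_modify, PySem.Dict.keys_insert_of_contains _ _ hc]
      · simp [hsep, hc]
    · simp [hsep]

lemma bInner_getD (child p : String) : ∀ (rest : List Char) (t : String) (d : PySem.Dict String (List String)),
    d.contains p = true →
    ((rest.foldl (bStep child) (d, t)).1).getD p [] =
      d.getD p [] ++ (if occB t.toList rest p.toList then [child] else []) := by
  intro rest
  induction rest with
  | nil => intro t d _; simp [occB]
  | cons ch rest' ih =>
    intro t d hc
    rw [List.foldl_cons]
    have hstep : bStep child (d, t) ch =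
        ((if ch = '.' ∨ ch = ':' then
            (if d.contains t then d.modify t [] (fun l => l ++ [child]) else d)
          else d), t.push ch) := rfl
    rw [hstep]
    by_cases hsep : (ch = '.' ∨ ch = ':')
    · by_cases hteq : t = p
      · subst hteq
        simp only [hsep, if_true, hc, if_true]
        rw [ih (t.push ch) _ (by rw [PySem.Dict.contains_modify]; simp)]
        have hoccfalse : occB (t.push ch).toList rest' t.toList = false := by
          cases hb : occB (t.push ch).toList rest' t.toList
          · rfl
          · have := occB_length hb
            rw [String.toList_push] at this
            simp at this
        have hoccT : occB t.toList (ch :: rest') t.toList = true := by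
          simp [occB, hsep]
        rw [hoccfalse, hoccT, PySem.Dict.getD_modify_self]
        simp
      · have hne : ¬ (t.toList = p.toList) := fun hh => hteq (String.toList_inj.mp hh)
        have hgd : (if d.contains t then d.modify t [] (fun l => l ++ [child]) else d).getD p [] = d.getD p [] := by
          by_cases hct : d.contains t
          · rw [if_pos hct, PySem.Dict.getD_modify]
            rw [if_neg (fun hh => hteq hh.symm)]
          · rw [if_neg hct]
        have hcp : (if d.contains t then d.modify t [] (fun l => l ++ [child]) else d).contains p = true := by
          by_cases hct : d.contains t
          · rw [if_pos hct, PySem.Dict.contains_modify]; simp [hc]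
          · rw [if_neg hct]; exact hc
        simp only [hsep, if_true]
        rw [ih (t.push ch) _ hcp, hgd]
        have : occB t.toList (ch :: rest') p.toList = occB (t.push ch).toList rest' p.toList := by
          simp [occB, hne, String.toList_push]
        rw [this]
    · simp only [hsep, if_false]
      rw [ih (t.push ch) _ hc]
      have : occB t.toList (ch :: rest') p.toList = occB (t.push ch).toList rest' p.toList := by
        simp [occB, hsep, String.toList_push]
      rw [this]

lemma bOuter_keys : ∀ (l : List String) (d : PySem.Dict String (List String)),
    (l.foldl (fun d child => (child.toList.foldl (bStep child) (d, "")).1) d).keys = d.keys := by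
  intro l
  induction l with
  | nil => intro d; rfl
  | cons c l ih => intro d; rw [List.foldl_cons, ih, bInner_keys]

lemma bOuter_getD (p : String) : ∀ (l : List String) (d : PySem.Dict String (List String)),
    d.contains p = true →
    (l.foldl (fun d child => (child.toList.foldl (bStep child) (d, "")).1) d).getD p [] =
      d.getD p [] ++ l.filter (fun c => occB [] c.toList p.toList) := by
  intro l
  induction l with
  | nil => intro d _; simp
  | cons c l ih =>
    intro d hc
    rw [List.foldl_cons]
    have hc1 : ((c.toList.foldl (bStep c) (d, "")).1).contains p = true := by
      rw [PySem.Dict.contains_eq_decide_mem_keys] at hc ⊢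
      rw [bInner_keys]; exact hc
    rw [ih _ hc1]
    have h0 : ("" : String).toList = [] := rfl
    have := bInner_getD c p c.toList "" d hc
    rw [h0] at this
    rw [this, List.filter_cons]
    by_cases hb : occB [] c.toList p.toList = true
    · simp [hb]
    · have hb' : occB [] c.toList p.toList = false := by
        cases h : occB [] c.toList p.toList
        · rfl
        · exact absurd h hb
      simp [hb']

-- ---- A-side dictionary lemmas ----

lemma aInner_getD (fn p : String) : ∀ (l : List String) (d : PySem.Dict String (List String)),
    (l.foldl (fun h o => if (o != fn) && is_child_py fn o then h.modify fn [] (fun x => x ++ [o]) else h) d).getD p [] =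
      d.getD p [] ++ (if p = fn then l.filter (fun o => (o != fn) && is_child_py fn o) else []) := by
  intro l
  induction l with
  | nil => intro d; simp
  | cons o l ih =>
    intro d
    rw [List.foldl_cons, ih]
    by_cases hcond : ((o != fn) && is_child_py fn o) = true
    · rw [if_pos hcond]
      by_cases hp : p = fn
      · subst hp
        rw [PySem.Dict.getD_modify_self]
        simp [hcond]
      · rw [PySem.Dict.getD_modify, if_neg hp]
        simp [hp]
    · rw [if_neg hcond, List.filter_cons]
      simp only [Bool.not_eq_true] at hcond
      simp [hcond]

lemma aInner_keys (fn : String) : ∀ (l : List String) (d : PySem.Dict String (List String)),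
    d.contains fn = true →
    (l.foldl (fun h o => if (o != fn) && is_child_py fn o then h.modify fn [] (fun x => x ++ [o]) else h) d).keys = d.keys := by
  intro l
  induction l with
  | nil => intro d _; rfl
  | cons o l ih =>
    intro d hc
    rw [List.foldl_cons]
    by_cases hcond : ((o != fn) && is_child_py fn o) = true
    · rw [if_pos hcond, ih _ (by rw [PySem.Dict.contains_modify]; simp [hc]),
        PySem.Dict.keys_modify, PySem.Dict.keys_insert_of_contains _ _ hc]
    · rw [if_neg hcond, ih _ hc]

lemma aOuter_keys (ns : List String) : ∀ (l : List String) (d : PySem.Dict String (List String)),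
    l.Nodup → (∀ x ∈ l, d.contains x = false) →
    (l.foldl (fun h fn => ns.foldl (fun h o => if (o != fn) && is_child_py fn o then h.modify fn [] (fun x => x ++ [o]) else h) (h.insert fn ([] : List String))) d).keys = d.keys ++ l := by
  intro l
  induction l with
  | nil => intro d _ _; simp
  | cons fn l ih =>
    intro d hnd hfresh
    rw [List.foldl_cons]
    have hk1 : (ns.foldl (fun h o => if (o != fn) && is_child_py fn o then h.modify fn [] (fun x => x ++ [o]) else h) (d.insert fn ([] : List String))).keys = d.keys ++ [fn] := by
      rw [aInner_keys fn ns _ (PySem.Dict.contains_insert_self _ _ _),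
        PySem.Dict.keys_insert_of_not_contains _ _ (hfresh fn (by simp))]
    rw [ih _ (List.nodup_cons.mp hnd).2 ?_, hk1]
    · simp
    · intro x hx
      have hxfn : x ≠ fn := fun hh => (List.nodup_cons.mp hnd).1 (hh ▸ hx)
      rw [PySem.Dict.contains_eq_decide_mem_keys, hk1]
      have hxd : d.contains x = false := hfresh x (by simp [hx])
      rw [PySem.Dict.contains_eq_decide_mem_keys] at hxd
      simp only [decide_eq_false_iff_not] at hxd ⊢
      intro hmem
      rcases List.mem_append.mp hmem with h | h
      · exact hxd h
      · exact hxfn (List.mem_singleton.mp h)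

lemma aOuter_getD_notmem (ns : List String) (p : String) : ∀ (l : List String) (d : PySem.Dict String (List String)),
    p ∉ l →
    (l.foldl (fun h fn => ns.foldl (fun h o => if (o != fn) && is_child_py fn o then h.modify fn [] (fun x => x ++ [o]) else h) (h.insert fn ([] : List String))) d).getD p [] = d.getD p [] := by
  intro l
  induction l with
  | nil => intro d _; rfl
  | cons fn l ih =>
    intro d hp
    rw [List.foldl_cons, ih _ (by simp at hp; exact fun h => hp.2 h), aInner_getD]
    have hpfn : p ≠ fn := by simp at hp; exact hp.1
    rw [if_neg hpfn, List.append_nil, PySem.Dict.getD_insert, if_neg hpfn]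

lemma aOuter_getD_mem (ns : List String) (p : String) : ∀ (l : List String) (d : PySem.Dict String (List String)),
    l.Nodup → p ∈ l →
    (l.foldl (fun h fn => ns.foldl (fun h o => if (o != fn) && is_child_py fn o then h.modify fn [] (fun x => x ++ [o]) else h) (h.insert fn ([] : List String))) d).getD p [] =
      ns.filter (fun o => (o != p) && is_child_py p o) := by
  intro l
  induction l with
  | nil => intro d _ hp; simp at hp
  | cons fn l ih =>
    intro d hnd hp
    rw [List.foldl_cons]
    rcases List.mem_cons.mp hp with rfl | hpl
    · have hpl : p ∉ l := (List.nodup_cons.mp hnd).1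
      rw [aOuter_getD_notmem ns p l _ hpl, aInner_getD, if_pos rfl,
        PySem.Dict.getD_insert, if_pos rfl]
      simp
    · exact ih _ (List.nodup_cons.mp hnd).2 hpl

-- the two folds produce the same items list over the sorted key list
lemma main_eq (mapping_fields : List (String × String)) :
    build_field_hierarchy_py mapping_fields = build_field_hierarchy_py_alt mapping_fields := by
  unfold build_field_hierarchy_py build_field_hierarchy_py_alt
  dsimp only
  set ns := PySem.List.sorted (PySem.Dict.ofList mapping_fields).keys (fun x => x) with hns
  have hnd : ns.Nodup := (PySem.List.sorted_perm _ _ _).symm.nodup (PySem.Dict.nodup_keys_ofList mapping_fields)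
  -- A side
  have hkA : (ns.foldl (fun h fn => ns.foldl (fun h o => if (o != fn) && is_child_py fn o then h.modify fn [] (fun x => x ++ [o]) else h) (h.insert fn ([] : List String))) PySem.Dict.empty).keys = ns := by
    have := aOuter_keys ns ns PySem.Dict.empty hnd (fun x _ => PySem.Dict.contains_empty x)
    simpa using this
  have itemsA : (ns.foldl (fun h fn => ns.foldl (fun h o => if (o != fn) && is_child_py fn o then h.modify fn [] (fun x => x ++ [o]) else h) (h.insert fn ([] : List String))) PySem.Dict.empty).items =
      ns.map (fun p => (p, ns.filter (fun o => (o != p) && is_child_py p o))) := by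
    rw [PySem.Dict.items_eq_map_keys _ (by rw [hkA]; exact hnd) [], hkA]
    exact List.map_eq_map_iff.mpr (fun p hp => by
      rw [aOuter_getD_mem ns p ns PySem.Dict.empty hnd hp])
  -- B side
  have items0 : (ns.foldl (fun (d : PySem.Dict String (List String)) n => d.insert n ([] : List String)) PySem.Dict.empty).items = ns.map (fun n => (n, ([] : List String))) := by
    have := PySem.Dict.items_foldl_insert_fresh ns (fun n => n) (fun _ => ([] : List String)) PySem.Dict.empty (fun a _ => PySem.Dict.contains_empty a) (by simpa using hnd)
    simpa using this
  have hk0 : (ns.foldl (fun (d : PySem.Dict String (List String)) n => d.insert n ([] : List String)) PySem.Dict.empty).keys = ns := by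
    have hkdef : ∀ (d : PySem.Dict String (List String)), d.keys = d.items.map (fun x => x.1) := fun d => rfl
    rw [hkdef, items0, List.map_map]
    exact List.map_id _
  have hkB : ((ns.foldl (fun d child => (child.toList.foldl (bStep child) (d, "")).1) (ns.foldl (fun (d : PySem.Dict String (List String)) n => d.insert n ([] : List String)) PySem.Dict.empty))).keys = ns := by
    rw [bOuter_keys, hk0]
  have itemsB : ((ns.foldl (fun d child => (child.toList.foldl (bStep child) (d, "")).1) (ns.foldl (fun (d : PySem.Dict String (List String)) n => d.insert n ([] : List String)) PySem.Dict.empty))).items =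
      ns.map (fun p => (p, ns.filter (fun c => occB [] c.toList p.toList))) := by
    rw [PySem.Dict.items_eq_map_keys _ (by rw [hkB]; exact hnd) [], hkB]
    refine List.map_eq_map_iff.mpr (fun p hp => ?_)
    have hc0 : (ns.foldl (fun (d : PySem.Dict String (List String)) n => d.insert n ([] : List String)) PySem.Dict.empty).contains p = true := by
      rw [PySem.Dict.contains_eq_decide_mem_keys, hk0]; simp [hp]
    rw [bOuter_getD p ns _ hc0]
    have hg0 : (ns.foldl (fun (d : PySem.Dict String (List String)) n => d.insert n ([] : List String)) PySem.Dict.empty).getD p [] = [] := by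
      have hmem : (p, ([] : List String)) ∈ (ns.foldl (fun (d : PySem.Dict String (List String)) n => d.insert n ([] : List String)) PySem.Dict.empty).items := by
        rw [items0]
        exact List.mem_map.mpr ⟨p, hp, rfl⟩
      exact PySem.Dict.getD_of_mem_items _ hmem (by rw [hk0]; exact hnd) []
    rw [hg0, List.nil_append]
  rw [itemsA, itemsB]
  exact List.map_eq_map_iff.mpr (fun p _ => by
    rw [List.filter_congr (fun c _ => condA_eq_occB p c)])

-- ===== VERDICT (by name: the statement is the Claim_ definition above) =====
theorem build_field_hierarchy_py_spec : Claim_equal_build_field_hierarchy_py := by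
  intro mapping_fields _
  unfold Spec_build_field_hierarchy_py
  exact main_eq mapping_fields
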